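-- pv_equiv track=rewrite | github.com/ibrahimRamdane/Application-de-la-theorie-des-jeux-solveur-et-heuristic | solveur_et_resolution_d_enigme/cotedazur.py | lig_col
-- ===== SOURCE A (Python) =====
-- def lig_col(grid):
--     # renvoie une premiere liste de la somme des variables de chaque ligne et une seconde liste de la somme
--     # des variables de chaque colonne
--     L = []
--     for i in range(len(grid)):
--         l = 0
--         for j in range(len(grid[0])):
--             l = l+grid[i][j]
--         L.append(l)
--     C = []
--     for j in range(len(grid[0])):
--         c = 0
--         for i in range(len(grid)):
--             c = c+grid[i][j]
--         C.append(c)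
--     return L, C
-- ===== SOURCE B (Python) =====
-- def lig_col(grid):
--     # single fused pass: one traversal of the rows accumulates both the list of
--     # row sums and the vector of column sums
--     m = len(grid[0])
--     L = []
--     C = [0] * m
--     for row in grid:
--         L.append(sum(row[j] for j in range(m)))
--         C = [C[j] + row[j] for j in range(m)]
--     return L, C
-- ===== Notes on version B (the rewrite author's own statement) =====
-- stated objective: alternative
-- what changed: A makes two separate index-based double loops (one for row sums, one for column sums); B makes a single fused pass over the rows, accumulating the row-sum list and the column-sum vector together.
import Mathlib
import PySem

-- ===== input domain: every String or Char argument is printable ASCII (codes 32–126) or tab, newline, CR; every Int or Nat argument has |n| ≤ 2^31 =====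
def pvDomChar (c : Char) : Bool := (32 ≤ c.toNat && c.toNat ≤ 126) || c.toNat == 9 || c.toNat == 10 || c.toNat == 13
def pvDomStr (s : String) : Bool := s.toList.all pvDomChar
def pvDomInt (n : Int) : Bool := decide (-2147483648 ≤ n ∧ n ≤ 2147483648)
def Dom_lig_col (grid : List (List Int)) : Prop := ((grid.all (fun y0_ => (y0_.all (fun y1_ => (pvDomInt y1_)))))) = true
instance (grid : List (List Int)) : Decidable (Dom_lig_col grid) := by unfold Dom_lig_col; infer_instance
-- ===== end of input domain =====

-- B fuses A's two separate index-based double loops into one pass over the rows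
-- that accumulates row sums and column sums together (alternative decomposition, same cost).


-- ===== PORT A =====
-- literal port of A: two index-based double loops (list append in each), pyGetD is
-- exact for the in-range indexing Pre_ guarantees
def lig_col (grid : List (List Int)) : List Int × List Int :=
  let m : Nat := (PySem.List.pyGetD grid 0 []).length
  let L := (PySem.List.pyRange 0 (grid.length : Int) 1).foldl (fun L i =>
      L ++ [(PySem.List.pyRange 0 (m : Int) 1).foldl (fun l j =>
          l + PySem.List.pyGetD (PySem.List.pyGetD grid i []) j 0) 0]) []
  let C := (PySem.List.pyRange 0 (m : Int) 1).foldl (fun C j =>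
      C ++ [(PySem.List.pyRange 0 (grid.length : Int) 1).foldl (fun c i =>
          c + PySem.List.pyGetD (PySem.List.pyGetD grid i []) j 0) 0]) []
  (L, C)

-- ===== PORT B =====
-- literal port of B: one fold over the rows carrying the pair (L, C)
def lig_col_alt (grid : List (List Int)) : List Int × List Int :=
  let m : Nat := (PySem.List.pyGetD grid 0 []).length
  grid.foldl (fun acc row =>
      (acc.1 ++ [((PySem.List.pyRange 0 (m : Int) 1).map (fun j => PySem.List.pyGetD row j 0)).sum],
       (PySem.List.pyRange 0 (m : Int) 1).map (fun j =>
          PySem.List.pyGetD acc.2 j 0 + PySem.List.pyGetD row j 0)))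
    ([], List.replicate m 0)

-- ===== PRECONDITION & SPEC =====
-- Pre_ excludes exactly the inputs where Python A raises IndexError: the empty grid
-- (len(grid[0])) and ragged grids with a row shorter than the first row.
def Pre_lig_col (grid : List (List Int)) : Prop :=
  grid ≠ [] ∧ ∀ row ∈ grid, (grid.headD []).length ≤ row.length
instance (grid : List (List Int)) : Decidable (Pre_lig_col grid) := by
  unfold Pre_lig_col; infer_instance
def pvWitness_lig_col : List (List Int) := [[1, 2], [3, 4]]

def Spec_lig_col (grid : List (List Int)) (out : List Int × List Int) : Prop := out = lig_col_alt grid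
instance (grid : List (List Int)) (out : List Int × List Int) : Decidable (Spec_lig_col grid out) := by unfold Spec_lig_col; infer_instance

-- ===== CLAIM (what is proved, stated in full; the proofs are below) =====
def Claim_equal_lig_col : Prop := ∀ (grid : List (List Int)), Dom_lig_col grid → Pre_lig_col grid → Spec_lig_col grid (lig_col grid)

-- ===== LEMMAS AND PROOFS =====

-- B's column accumulator: folding elementwise addition over the rows, starting from
-- a range-indexed initial vector, yields the range-indexed vector of column folds.
theorem colfold (m : Nat) (gs : List (List Int)) (h : Int → Int) :
    gs.foldl (fun C row => (PySem.List.pyRange 0 (m : Int) 1).map (fun j =>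
        PySem.List.pyGetD C j 0 + PySem.List.pyGetD row j 0))
      ((PySem.List.pyRange 0 (m : Int) 1).map h)
    = (PySem.List.pyRange 0 (m : Int) 1).map (fun j =>
        gs.foldl (fun c row => c + PySem.List.pyGetD row j 0) (h j)) := by
  induction gs generalizing h with
  | nil => rfl
  | cons g gs ih =>
    simp only [List.foldl_cons]
    rw [show ((PySem.List.pyRange 0 (m : Int) 1).map (fun j =>
          PySem.List.pyGetD ((PySem.List.pyRange 0 (m : Int) 1).map h) j 0 + PySem.List.pyGetD g j 0))
        = ((PySem.List.pyRange 0 (m : Int) 1).map (fun j => h j + PySem.List.pyGetD g j 0)) from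
      List.map_congr_left (fun j hj => by
        obtain ⟨h0, hm⟩ := PySem.List.mem_pyRange_one.mp hj
        rw [PySem.List.pyGetD_map_pyRange_of_nonneg h (m : Int) j 0 h0 hm])]
    exact ih (fun j => h j + PySem.List.pyGetD g j 0)

-- the initial vector [0]*m is the range-indexed constant-zero vector
theorem replicate_zero_eq_map (m : Nat) :
    (List.replicate m (0 : Int)) = (PySem.List.pyRange 0 (m : Int) 1).map (fun _ => 0) := by
  rw [List.map_const', PySem.List.length_pyRange_one]
  norm_num

-- ===== VERDICT (by name: the statement is the Claim_ definition above) =====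
theorem lig_col_spec : Claim_equal_lig_col := by
  intro grid _ _
  unfold Spec_lig_col lig_col lig_col_alt
  rw [PySem.List.foldl_prod_mk
    (fun L row => L ++ [((PySem.List.pyRange 0 ((PySem.List.pyGetD grid 0 []).length : Int) 1).map
        (fun j => PySem.List.pyGetD row j 0)).sum])
    (fun C row => (PySem.List.pyRange 0 ((PySem.List.pyGetD grid 0 []).length : Int) 1).map
        (fun j => PySem.List.pyGetD C j 0 + PySem.List.pyGetD row j 0))
    grid [] (List.replicate (PySem.List.pyGetD grid 0 []).length 0)]
  simp only [PySem.List.foldl_append_singleton_eq_map, List.nil_append]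
  rw [Prod.mk.injEq]
  constructor
  · -- row sums: both sides are grid.map (row-sum)
    rw [show (fun i => (PySem.List.pyRange 0 ((PySem.List.pyGetD grid 0 []).length : Int) 1).foldl
          (fun l j => l + PySem.List.pyGetD (PySem.List.pyGetD grid i []) j 0) 0)
        = (fun i => ((PySem.List.pyRange 0 ((PySem.List.pyGetD grid 0 []).length : Int) 1).map
            (fun j => PySem.List.pyGetD (PySem.List.pyGetD grid i []) j 0)).sum) from
      funext (fun i => by rw [PySem.List.foldl_add]; ring)]
    rw [show (fun i => ((PySem.List.pyRange 0 ((PySem.List.pyGetD grid 0 []).length : Int) 1).map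
          (fun j => PySem.List.pyGetD (PySem.List.pyGetD grid i []) j 0)).sum)
        = (fun (row : List Int) => ((PySem.List.pyRange 0 ((PySem.List.pyGetD grid 0 []).length : Int) 1).map
            (fun j => PySem.List.pyGetD row j 0)).sum) ∘ (fun i => PySem.List.pyGetD grid i []) from rfl]
    rw [← List.map_map, PySem.List.map_pyGetD_pyRange_zero']
  · -- column sums
    rw [replicate_zero_eq_map, colfold]
    exact List.map_congr_left (fun j _ => by
      exact PySem.List.foldl_pyRange_zero_pyGetD' grid [] (fun c row => c + PySem.List.pyGetD row j 0) 0)
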